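-- pv_equiv track=rewrite | github.com/MrDonaldoWorking/discord_scripts | parse_discord_files.py | group_is_values
-- ===== SOURCE A (Python) =====
-- def group_is_values(ises):
--     is_map = {}
--     for isi in sorted(set(ises)):
--         if (isi - 1) in is_map:
--             is_map[isi] = is_map[isi - 1]
--         elif (isi - 2) in is_map:
--             is_map[isi] = is_map[isi - 2]
--         else:
--             is_map[isi] = isi
--     return is_map
-- ===== SOURCE B (Python) =====
-- def group_is_values(ises):
--     # Stage 1: partition the sorted distinct values into maximal runs whose
--     # adjacent gaps are <= 2 (inner while scans one run, outer while advances).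
--     # Stage 2: one dict comprehension maps every value of a run to its first element.
--     vals = sorted(set(ises))
--     runs = []
--     i = 0
--     n = len(vals)
--     while i < n:
--         j = i + 1
--         while j < n and vals[j] - vals[j - 1] <= 2:
--             j += 1
--         runs.append(vals[i:j])
--         i = j
--     return {v: r[0] for r in runs for v in r}
-- ===== Notes on version B (the rewrite author's own statement) =====
-- stated objective: alternative
-- what changed: Instead of A's incremental dict with backward membership lookups at isi-1/isi-2, B recursively partitions the sorted distinct values into maximal runs with adjacent gaps <= 2 and then builds the whole mapping in one dict comprehension sending every value of a run to the run's first element.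
import Mathlib
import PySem

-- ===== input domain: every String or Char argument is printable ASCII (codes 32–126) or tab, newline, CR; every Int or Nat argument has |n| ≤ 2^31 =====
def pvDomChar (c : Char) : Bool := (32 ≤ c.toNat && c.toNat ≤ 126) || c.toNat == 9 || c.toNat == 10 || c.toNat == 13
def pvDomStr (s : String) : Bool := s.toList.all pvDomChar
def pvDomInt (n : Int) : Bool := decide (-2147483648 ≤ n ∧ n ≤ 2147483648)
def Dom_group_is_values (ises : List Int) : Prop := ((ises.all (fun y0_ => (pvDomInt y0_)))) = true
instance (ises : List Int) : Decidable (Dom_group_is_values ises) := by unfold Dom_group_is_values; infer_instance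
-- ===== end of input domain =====

-- B re-derives the same mapping by partitioning the sorted distinct values into
-- maximal runs with adjacent gaps <= 2 and mapping every run member to the run's
-- first element (objective: alternative decomposition; return value only).

-- ===== PORT A =====
-- one loop body of A: membership tests on isi-1 and isi-2, else a fresh group
def stepA (d : PySem.Dict Int Int) (isi : Int) : PySem.Dict Int Int :=
  match d.get? (isi - 1) with
  | some v => d.insert isi v
  | none =>
    match d.get? (isi - 2) with
    | some v => d.insert isi v
    | none => d.insert isi isi

def group_is_values (ises : List Int) : List (Int × Int) :=
  ((PySem.List.sorted (PySem.Set.ofList ises) (fun x => x) false).foldl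
    stepA PySem.Dict.empty).items

-- ===== PORT B =====
-- Source B's inner while loop (j scanning one run): consume the elements continuing
-- the current run (gap to the previous value <= 2); returns (run, remainder)
def takeRun (prev : Int) : List Int → List Int × List Int
  | [] => ([], [])
  | x :: xs =>
    if x - prev ≤ 2 then
      let p := takeRun x xs
      (x :: p.1, p.2)
    else ([], x :: xs)

lemma takeRun_snd_length (prev : Int) (l : List Int) :
    (takeRun prev l).2.length ≤ l.length := by
  induction l generalizing prev with
  | nil => simp [takeRun]
  | cons x xs ih =>
    simp only [takeRun]
    split
    · exact le_trans (ih x) (by simp)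
    · simp

-- Source B's outer while loop over i, as structural recursion on the remaining
-- suffix vals[i:]: split off the first maximal run, continue on the rest
def runsB : List Int → List (List Int)
  | [] => []
  | x :: xs =>
    let p := takeRun x xs
    (x :: p.1) :: runsB p.2
termination_by l => l.length
decreasing_by
  have := takeRun_snd_length x xs
  simp only [List.length_cons]
  omega

-- the dict comprehension: insert (v, r[0]) for every run r and every v in r
def group_is_values_alt (ises : List Int) : List (Int × Int) :=
  (((runsB (PySem.List.sorted (PySem.Set.ofList ises) (fun x => x) false)).flatMap
      (fun r => r.map (fun v => (v, r.headD 0)))).foldl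
    (fun d p => d.insert p.1 p.2) (PySem.Dict.empty : PySem.Dict Int Int)).items

-- ===== PRECONDITION & SPEC =====
def Spec_group_is_values (ises : List Int) (out : List (Int × Int)) : Prop := out = group_is_values_alt ises
instance (ises : List Int) (out : List (Int × Int)) : Decidable (Spec_group_is_values ises out) := by unfold Spec_group_is_values; infer_instance

-- ===== CLAIM (what is proved, stated in full; the proofs are below) =====
def Claim_equal_group_is_values : Prop := ∀ (ises : List Int), Dom_group_is_values ises → Spec_group_is_values ises (group_is_values ises)

-- ===== LEMMAS AND PROOFS =====

lemma get?_none_of_gt (d : PySem.Dict Int Int) (prev x : Int)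
    (hub : ∀ k ∈ d.keys, k ≤ prev) (hx : prev < x) : d.get? x = none := by
  rw [PySem.Dict.get?_eq_none_iff_not_mem_keys]
  intro hm
  exact absurd (hub x hm) (by omega)

lemma takeRun_append (prev : Int) (l : List Int) :
    (takeRun prev l).1 ++ (takeRun prev l).2 = l := by
  induction l generalizing prev with
  | nil => simp [takeRun]
  | cons x xs ih =>
    simp only [takeRun]
    split
    · simpa using ih x
    · simp

lemma takeRun_chain (l : List Int) : ∀ (prev : Int), l.Pairwise (· < ·) →
    (∀ h ∈ l, prev < h) →
    List.IsChain (fun u v => u < v ∧ v - u ≤ 2) (prev :: (takeRun prev l).1) := by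
  induction l with
  | nil => intro prev _ _; simp [takeRun]
  | cons x xs ih =>
    intro prev hp hlt
    simp only [takeRun]
    split
    · exact List.isChain_cons_cons.mpr ⟨⟨hlt x (by simp), by omega⟩,
        ih x hp.of_cons (fun h hh => List.rel_of_pairwise_cons hp hh)⟩
    · simp

lemma takeRun_snd_gt (l : List Int) : ∀ (prev : Int), l.Pairwise (· < ·) →
    (∀ h ∈ l, prev < h) →
    ∀ h ∈ (takeRun prev l).2, (takeRun prev l).1.getLastD prev + 2 < h := by
  induction l with
  | nil => intro prev _ _; simp [takeRun]
  | cons x xs ih =>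
    intro prev hp hlt
    simp only [takeRun]
    split
    · rw [List.getLastD_cons]
      exact ih x hp.of_cons (fun h hh => List.rel_of_pairwise_cons hp hh)
    · intro h hh
      rcases List.mem_cons.mp hh with h1 | h2
      · simp only [List.getLastD_nil]; omega
      · have hx : x < h := List.rel_of_pairwise_cons hp h2
        have hpx : prev < x := hlt x (by simp)
        simp only [List.getLastD_nil]; omega

-- folding A's loop body over one run inserts the run's representative throughout
lemma run_fold (a : List Int) : ∀ (d : PySem.Dict Int Int) (prev rep : Int),
    List.IsChain (fun u v => u < v ∧ v - u ≤ 2) (prev :: a) →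
    d.get? prev = some rep → (∀ k ∈ d.keys, k ≤ prev) →
    a.foldl stepA d = a.foldl (fun d v => d.insert v rep) d ∧
    (a.foldl (fun d v => d.insert v rep) d).get? (a.getLastD prev) = some rep ∧
    (∀ k ∈ (a.foldl (fun d v => d.insert v rep) d).keys, k ≤ a.getLastD prev) := by
  induction a with
  | nil => intro d prev rep _ hget hub; exact ⟨rfl, hget, hub⟩
  | cons v rest ih =>
    intro d prev rep hch hget hub
    obtain ⟨⟨hlt, hgap⟩, hch'⟩ := List.isChain_cons_cons.mp hch
    have hstep : stepA d v = d.insert v rep := by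
      by_cases h1 : prev = v - 1
      · have : d.get? (v - 1) = some rep := h1 ▸ hget
        simp [stepA, this]
      · have hn1 : d.get? (v - 1) = none := get?_none_of_gt d prev _ hub (by omega)
        have h2 : prev = v - 2 := by omega
        have : d.get? (v - 2) = some rep := h2 ▸ hget
        simp [stepA, hn1, this]
    have hub' : ∀ k ∈ (d.insert v rep).keys, k ≤ v := by
      intro k hk
      rcases (PySem.Dict.mem_keys_insert _ _ _ _).mp hk with h | h
      · omega
      · have := hub k h; omega
    have := ih (d.insert v rep) v rep hch' (PySem.Dict.get?_insert_self _ _ _) hub'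
    rw [List.foldl_cons, List.foldl_cons, hstep, List.getLastD_cons]
    exact this

-- A's whole loop, decomposed along B's run structure
lemma main_fold (n : Nat) : ∀ (l : List Int), l.length ≤ n → l.Pairwise (· < ·) →
    ∀ (d : PySem.Dict Int Int) (prev : Int),
    (∀ h ∈ l, prev + 2 < h) → (∀ k ∈ d.keys, k ≤ prev) →
    l.foldl stepA d =
      (runsB l).foldl (fun d r => r.foldl (fun d v => d.insert v (r.headD 0)) d) d := by
  induction n with
  | zero =>
    intro l hn _ d prev _ _
    have : l = [] := List.eq_nil_of_length_eq_zero (Nat.le_zero.mp hn)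
    subst this; simp [runsB]
  | succ n ih =>
    intro l hn hp d prev hlt hub
    match l with
    | [] => simp [runsB]
    | x :: xs =>
      obtain ⟨a, b, hab⟩ : ∃ a b, takeRun x xs = (a, b) := ⟨_, _, rfl⟩
      have hxs_pair : xs.Pairwise (· < ·) := hp.of_cons
      have hxlt : ∀ h ∈ xs, x < h := fun h hh => List.rel_of_pairwise_cons hp hh
      have happ : a ++ b = xs := by simpa [hab] using takeRun_append x xs
      have hch : List.IsChain (fun u v => u < v ∧ v - u ≤ 2) (x :: a) := by
        have := takeRun_chain xs x hxs_pair hxlt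
        rwa [hab] at this
      have hbgt : ∀ h ∈ b, a.getLastD x + 2 < h := by
        have := takeRun_snd_gt xs x hxs_pair hxlt
        rwa [hab] at this
      have hpx : prev + 2 < x := hlt x (by simp)
      have hn1 : d.get? (x - 1) = none := get?_none_of_gt d prev _ hub (by omega)
      have hn2 : d.get? (x - 2) = none := get?_none_of_gt d prev _ hub (by omega)
      have hstep : stepA d x = d.insert x x := by simp [stepA, hn1, hn2]
      have hub' : ∀ k ∈ (d.insert x x).keys, k ≤ x := by
        intro k hk
        rcases (PySem.Dict.mem_keys_insert _ _ _ _).mp hk with h | h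
        · omega
        · have := hub k h; omega
      obtain ⟨hrun, hgetl, hubl⟩ :=
        run_fold a (d.insert x x) x x hch (PySem.Dict.get?_insert_self _ _ _) hub'
      have hb_pair : b.Pairwise (· < ·) := by
        have := happ ▸ hxs_pair
        exact (List.pairwise_append.mp this).2.1
      have hb_len : b.length ≤ n := by
        have : a.length + b.length = xs.length := by
          simpa using congrArg List.length happ
        simp only [List.length_cons] at hn
        omega
      have hrec := ih b hb_len hb_pair
        (a.foldl (fun d v => d.insert v x) (d.insert x x)) (a.getLastD x) hbgt hubl
      calc (x :: xs).foldl stepA d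
          = b.foldl stepA (a.foldl stepA (stepA d x)) := by
            rw [show x :: xs = x :: (a ++ b) by rw [happ]]
            simp [List.foldl_append]
        _ = (runsB b).foldl
              (fun d r => r.foldl (fun d v => d.insert v (r.headD 0)) d)
              (a.foldl (fun d v => d.insert v x) (d.insert x x)) := by
            rw [hstep, hrun, hrec]
        _ = (runsB (x :: xs)).foldl
              (fun d r => r.foldl (fun d v => d.insert v (r.headD 0)) d) d := by
            rw [runsB, hab]
            simp

-- ===== VERDICT (by name: the statement is the Claim_ definition above) =====
theorem group_is_values_spec : Claim_equal_group_is_values := by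
  intro ises _
  unfold Spec_group_is_values group_is_values group_is_values_alt
  have hp := PySem.List.sorted_ofList_pairwise_lt (xs := ises)
  rw [List.foldl_flatMap]
  have hinner : ∀ (d : PySem.Dict Int Int) (r : List Int),
      (r.map (fun v => (v, r.headD 0))).foldl (fun d p => d.insert p.1 p.2) d =
      r.foldl (fun d v => d.insert v (r.headD 0)) d := by
    intro d r; rw [List.foldl_map]
  simp only [hinner]
  cases hl : PySem.List.sorted (PySem.Set.ofList ises) (fun x => x) false with
  | nil => simp [runsB]
  | cons c rest =>
    rw [hl] at hp
    congr 1
    exact main_fold (c :: rest).length (c :: rest) le_rfl hp PySem.Dict.empty (c - 3)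
      (by intro h hh
          rcases List.mem_cons.mp hh with h1 | h2
          · omega
          · have := List.rel_of_pairwise_cons hp h2; omega)
      (by intro k hk; simp [PySem.Dict.empty, PySem.Dict.keys] at hk)
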